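-- pv_equiv track=rewrite | github.com/uchebnick/unch-searcher | scripts/render_benchmark_summary.py | format_mode_counts
-- ===== SOURCE A (Python) =====
-- def format_mode_counts(counts: dict | None) -> str:
--     if not counts:
--         return "none"
--
--     ordered_keys = ["auto", "semantic", "lexical"]
--     parts: list[str] = []
--     seen: set[str] = set()
--
--     for key in ordered_keys:
--         if key in counts:
--             parts.append(f"{key}={counts[key]}")
--             seen.add(key)
--
--     for key in sorted(counts):
--         if key in seen:
--             continue
--         parts.append(f"{key}={counts[key]}")
--
--     return " ".join(parts)
-- ===== SOURCE B (Python) =====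
-- def format_mode_counts(counts: dict | None) -> str:
--     if not counts:
--         return "none"
--     rank = {"auto": 0, "semantic": 1, "lexical": 2}
--     ordered = sorted(counts, key=lambda k: (rank.get(k, 3), k))
--     return " ".join(f"{k}={counts[k]}" for k in ordered)
-- ===== Notes on version B (the rewrite author's own statement) =====
-- stated objective: simpler
-- what changed: Replaces A's two passes (a priority loop building a parts list plus a seen set, then a sorted-keys loop skipping seen keys) with a single keyed sort by (priority rank, key) and one join.
import Mathlib
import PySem

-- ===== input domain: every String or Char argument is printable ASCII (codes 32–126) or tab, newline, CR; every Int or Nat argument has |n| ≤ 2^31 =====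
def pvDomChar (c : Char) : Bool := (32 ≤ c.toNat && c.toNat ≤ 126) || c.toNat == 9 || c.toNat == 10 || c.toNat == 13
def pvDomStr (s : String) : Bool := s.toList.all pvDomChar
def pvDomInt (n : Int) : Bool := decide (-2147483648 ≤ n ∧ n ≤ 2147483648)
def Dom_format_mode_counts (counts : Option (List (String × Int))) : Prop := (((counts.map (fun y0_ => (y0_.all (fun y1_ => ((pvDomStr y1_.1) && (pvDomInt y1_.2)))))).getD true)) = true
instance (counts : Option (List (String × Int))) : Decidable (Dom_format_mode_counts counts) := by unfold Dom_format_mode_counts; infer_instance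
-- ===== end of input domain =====

-- B replaces A's two passes (priority loop + seen set + sorted remainder loop) with one sort keyed by (priority rank, key); objective: simpler.

-- ===== PORT A =====
def format_mode_counts (counts : Option (List (String × Int))) : String :=
  match counts with
  | none => "none"
  | some l =>
    if l = [] then "none"
    else
      let d := PySem.Dict.ofList l
      let orderedKeys : List String := ["auto", "semantic", "lexical"]
      let st := orderedKeys.foldl
        (fun (st : List String × PySem.Set String) key =>
          if d.contains key then
            (st.1 ++ [key ++ "=" ++ PySem.Int.toStr (d.getD key 0)], st.2.add key)
          else st)
        ([], PySem.Set.empty)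
      let parts := (PySem.List.sorted d.keys (fun k => k)).foldl
        (fun ps key =>
          if st.2.contains key then ps
          else ps ++ [key ++ "=" ++ PySem.Int.toStr (d.getD key 0)])
        st.1
      PySem.Str.join " " parts

-- ===== PORT B =====
def format_mode_counts_alt (counts : Option (List (String × Int))) : String :=
  match counts with
  | none => "none"
  | some l =>
    if l = [] then "none"
    else
      let d := PySem.Dict.ofList l
      let rank : PySem.Dict String Int :=
        PySem.Dict.ofList [("auto", 0), ("semantic", 1), ("lexical", 2)]
      let ordered := PySem.List.sorted2 d.keys (fun k => rank.getD k 3) (fun k => k)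
      PySem.Str.join " " (ordered.map (fun k => k ++ "=" ++ PySem.Int.toStr (d.getD k 0)))

-- ===== PRECONDITION & SPEC =====
def Spec_format_mode_counts (counts : Option (List (String × Int))) (out : String) : Prop := out = format_mode_counts_alt counts
instance (counts : Option (List (String × Int))) (out : String) : Decidable (Spec_format_mode_counts counts out) := by unfold Spec_format_mode_counts; infer_instance

-- ===== CLAIM (what is proved, stated in full; the proofs are below) =====
def Claim_equal_format_mode_counts : Prop := ∀ (counts : Option (List (String × Int))), Dom_format_mode_counts counts → Spec_format_mode_counts counts (format_mode_counts counts)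

-- ===== LEMMAS AND PROOFS =====

-- the rank function B's dict computes
def pvRankf (k : String) : Int :=
  if k = "auto" then 0 else if k = "semantic" then 1 else if k = "lexical" then 2 else 3

lemma rank_getD (k : String) :
    (PySem.Dict.ofList [("auto", (0:Int)), ("semantic", 1), ("lexical", 2)]).getD k 3 = pvRankf k := by
  by_cases h1 : k = "auto"
  · subst h1; rfl
  · by_cases h2 : k = "semantic"
    · subst h2; rfl
    · by_cases h3 : k = "lexical"
      · subst h3; rfl
      · have e1 : (("auto" : String) == k) = false := by
          simp only [beq_eq_false_iff_ne]; exact fun hh => h1 hh.symm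
        have e2 : (("semantic" : String) == k) = false := by
          simp only [beq_eq_false_iff_ne]; exact fun hh => h2 hh.symm
        have e3 : (("lexical" : String) == k) = false := by
          simp only [beq_eq_false_iff_ne]; exact fun hh => h3 hh.symm
        show (PySem.Dict.mk [("auto", (0:Int)), ("semantic", 1), ("lexical", 2)]).getD k 3 = pvRankf k
        simp [PySem.Dict.getD, PySem.Dict.get?, e1, e2, e3, pvRankf, h1, h2, h3]

-- the strict lexicographic order used to pin down sorted2's result
def pvLexLt {α : Type} (k1 : α → Int) (k2 : α → String) (a b : α) : Prop :=
  k1 a < k1 b ∨ (k1 a = k1 b ∧ k2 a < k2 b)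

def pvLexLe {α : Type} (k1 : α → Int) (k2 : α → String) (a b : α) : Prop :=
  k1 a < k1 b ∨ (k1 a = k1 b ∧ k2 a ≤ k2 b)

lemma insertBy_pairwise_R {α : Type} (R : α → α → Prop) (before : α → α → Bool)
    (htrans : ∀ a b c, R a b → R b c → R a c)
    (ht : ∀ a b, before a b = true → R a b)
    (hf : ∀ a b, before a b = false → R b a)
    (x : α) (ys : List α) (h : List.Pairwise R ys) :
    List.Pairwise R (PySem.List.insertBy before x ys) := by
  induction ys with
  | nil => simp [PySem.List.insertBy]
  | cons y ys ih =>
    rw [PySem.List.insertBy]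
    rcases List.pairwise_cons.mp h with ⟨hy, hys⟩
    by_cases hb : before x y = true
    · simp only [hb, if_pos]
      refine List.pairwise_cons.mpr ⟨?_, h⟩
      intro z hz
      rcases List.mem_cons.mp hz with rfl | hz
      · exact ht _ _ hb
      · exact htrans _ _ _ (ht _ _ hb) (hy _ hz)
    · rw [if_neg hb]
      refine List.pairwise_cons.mpr ⟨?_, ih hys⟩
      intro z hz
      rcases (PySem.List.mem_insertBy _ _ _ _).mp hz with rfl | hz
      · exact hf _ _ (by simpa using hb)
      · exact hy _ hz

lemma foldl_insertBy_pairwise_R {α : Type} (R : α → α → Prop) (before : α → α → Bool)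
    (htrans : ∀ a b c, R a b → R b c → R a c)
    (ht : ∀ a b, before a b = true → R a b)
    (hf : ∀ a b, before a b = false → R b a)
    (xs acc : List α) (hacc : List.Pairwise R acc) :
    List.Pairwise R (List.foldl (fun acc x => PySem.List.insertBy before x acc) acc xs) := by
  induction xs generalizing acc with
  | nil => simpa using hacc
  | cons x xs ih =>
    simp only [List.foldl_cons]
    exact ih _ (insertBy_pairwise_R R before htrans ht hf x acc hacc)

-- sorted2 of a nodup list with an injective second key is the unique strictly lex-sorted rearrangement
lemma sorted2_eq_of_perm_of_pairwise_lex {α : Type} (xs ys : List α)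
    (k1 : α → Int) (k2 : α → String) (hinj : Function.Injective k2) (hnd : xs.Nodup)
    (hperm : ys.Perm xs) (hpw : List.Pairwise (pvLexLt k1 k2) ys) :
    PySem.List.sorted2 xs k1 k2 = ys := by
  have hperm2 : (PySem.List.sorted2 xs k1 k2).Perm xs := PySem.List.sorted2_perm xs k1 k2 false
  have hle : List.Pairwise (pvLexLe k1 k2) (PySem.List.sorted2 xs k1 k2) := by
    unfold PySem.List.sorted2
    refine foldl_insertBy_pairwise_R _ _ ?_ ?_ ?_ xs [] (by simp)
    · rintro a b c (h1 | ⟨h1, h1'⟩) (h2 | ⟨h2, h2'⟩)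
      · exact Or.inl (lt_trans h1 h2)
      · exact Or.inl (h2 ▸ h1)
      · exact Or.inl (h1 ▸ h2)
      · exact Or.inr ⟨h1.trans h2, le_trans h1' h2'⟩
    · intro a b hb
      have hb' : (decide (k1 a < k1 b) || (!decide (k1 b < k1 a) && decide (k2 a < k2 b))) = true := hb
      simp only [Bool.or_eq_true, Bool.and_eq_true, Bool.not_eq_true', decide_eq_true_eq,
        decide_eq_false_iff_not] at hb'
      rcases hb' with h | ⟨h, h'⟩
      · exact Or.inl h
      · rcases lt_or_eq_of_le (not_lt.mp h) with hlt | heq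
        · exact Or.inl hlt
        · exact Or.inr ⟨heq, le_of_lt h'⟩
    · intro a b hb
      have hb' : (decide (k1 a < k1 b) || (!decide (k1 b < k1 a) && decide (k2 a < k2 b))) = false := hb
      simp only [Bool.or_eq_false_iff, Bool.and_eq_false_iff, Bool.not_eq_false', decide_eq_true_eq,
        decide_eq_false_iff_not] at hb'
      rcases hb' with ⟨h1, h2⟩
      rcases h2 with h2 | h2
      · exact Or.inl h2
      · rcases lt_or_eq_of_le (not_lt.mp h1) with hlt | heq
        · exact Or.inl hlt
        · exact Or.inr ⟨heq, not_lt.mp h2⟩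
  have hndL : (PySem.List.sorted2 xs k1 k2).Nodup := hperm2.nodup_iff.mpr hnd
  have hlt : List.Pairwise (pvLexLt k1 k2) (PySem.List.sorted2 xs k1 k2) := by
    have hndL' : List.Pairwise (fun a b => a ≠ b) (PySem.List.sorted2 xs k1 k2) := hndL
    have := List.Pairwise.and hle hndL'
    refine this.imp ?_
    rintro a b ⟨hab, hne⟩
    rcases hab with h | ⟨h, h'⟩
    · exact Or.inl h
    · refine Or.inr ⟨h, lt_of_le_of_ne h' (fun e => hne (hinj e))⟩
  refine List.eq_of_perm_of_sorted ?_ hlt hpw (hperm2.trans hperm.symm)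
  rintro a b _ _ (h1 | ⟨h1, h1'⟩) (h2 | ⟨h2, h2'⟩)
  · exact absurd h2 (lt_asymm h1)
  · exact absurd h1 (h2 ▸ lt_irrefl _)
  · exact absurd h2 (h1 ▸ lt_irrefl _)
  · exact absurd h2' (not_lt.mpr (le_of_lt h1'))

-- filtering commutes with sorting a nodup list by the identity key
lemma filter_sorted_id (ks : List String) (hnd : ks.Nodup) (p : String → Bool) :
    (PySem.List.sorted ks (fun k => k)).filter p = PySem.List.sorted (ks.filter p) (fun k => k) := by
  refine (PySem.List.sorted_eq_of_perm_of_pairwise_lt _ _ _ ?_ ?_).symm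
  · exact (PySem.List.sorted_perm ks (fun k => k) false).filter p
  · have hpw : List.Pairwise (fun a b : String => a ≤ b) (PySem.List.sorted ks (fun k => k)) :=
      PySem.List.sorted_pairwise ks (fun k => k)
    have hndS : (PySem.List.sorted ks (fun k => k)).Nodup :=
      (PySem.List.sorted_perm ks (fun k => k) false).nodup_iff.mpr hnd
    have hndS' : List.Pairwise (fun a b : String => a ≠ b) (PySem.List.sorted ks (fun k => k)) := hndS
    have := List.Pairwise.sublist (List.filter_sublist (p := p)) (List.Pairwise.and hpw hndS')
    exact this.imp (fun ⟨hle, hne⟩ => lt_of_le_of_ne hle hne)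

-- A's first loop: collect priority keys present, in order, remembering them in the set
lemma loopA (d : PySem.Dict String Int) (P : List String)
    (ps0 : List String) (sn0 : PySem.Set String) :
    P.foldl
      (fun (st : List String × PySem.Set String) key =>
        if d.contains key then
          (st.1 ++ [key ++ "=" ++ PySem.Int.toStr (d.getD key 0)], st.2.add key)
        else st)
      (ps0, sn0)
    = (ps0 ++ (P.filter (fun k => d.contains k)).map
          (fun key => key ++ "=" ++ PySem.Int.toStr (d.getD key 0)),
       PySem.Set.update sn0 (P.filter (fun k => d.contains k))) := by
  induction P generalizing ps0 sn0 with
  | nil => simp [PySem.Set.update]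
  | cons k P ih =>
    by_cases h : d.contains k
    · simp only [List.foldl_cons, h, if_pos, List.filter_cons, List.map_cons]
      rw [ih]
      simp [PySem.Set.update]
    · simp only [List.foldl_cons, h, List.filter_cons]
      rw [ih]
      simp [PySem.Set.update]

-- the shared key order of both programs
def pvOrder (ks : List String) : List String :=
  (["auto", "semantic", "lexical"].filter (fun k => decide (k ∈ ks)))
    ++ PySem.List.sorted (ks.filter (fun k => !decide (k ∈ (["auto", "semantic", "lexical"] : List String)))) (fun k => k)

lemma pvRankf_of_not_mem (k : String) (h : k ∉ (["auto", "semantic", "lexical"] : List String)) :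
    pvRankf k = 3 := by
  simp only [List.mem_cons, not_or] at h
  simp [pvRankf, h.1, h.2.1, h.2.2.1]

lemma pvOrder_perm (ks : List String) (hnd : ks.Nodup) : (pvOrder ks).Perm ks := by
  unfold pvOrder
  have h1 : ((["auto", "semantic", "lexical"] : List String).filter (fun k => decide (k ∈ ks))).Perm
      (ks.filter (fun k => decide (k ∈ (["auto", "semantic", "lexical"] : List String)))) := by
    refine (List.perm_ext_iff_of_nodup (List.Nodup.filter _ (by decide)) (List.Nodup.filter _ hnd)).mpr ?_
    intro a
    simp only [List.mem_filter, decide_eq_true_eq]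
    exact ⟨fun ⟨h1, h2⟩ => ⟨h2, h1⟩, fun ⟨h1, h2⟩ => ⟨h2, h1⟩⟩
  exact (h1.append (PySem.List.sorted_perm _ _ false)).trans
    (List.filter_append_perm (fun k => decide (k ∈ (["auto", "semantic", "lexical"] : List String))) ks)

lemma pvOrder_pairwise (ks : List String) (hnd : ks.Nodup) :
    List.Pairwise (pvLexLt pvRankf (fun k => k)) (pvOrder ks) := by
  unfold pvOrder
  rw [List.pairwise_append]
  refine ⟨?_, ?_, ?_⟩
  · -- the priority part: the three ranks are 0 < 1 < 2 in order, whatever subset survives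
    by_cases h1 : ("auto" : String) ∈ ks <;> by_cases h2 : ("semantic" : String) ∈ ks <;>
      by_cases h3 : ("lexical" : String) ∈ ks <;>
      simp [h1, h2, h3, pvLexLt, pvRankf]
  · -- the remainder: all ranks are 3, keys strictly increase
    have hpw : List.Pairwise (fun a b : String => a ≤ b)
        (PySem.List.sorted (ks.filter (fun k => !decide (k ∈ (["auto", "semantic", "lexical"] : List String)))) (fun k => k)) :=
      PySem.List.sorted_pairwise _ _
    have hndS : (PySem.List.sorted (ks.filter (fun k => !decide (k ∈ (["auto", "semantic", "lexical"] : List String)))) (fun k => k)).Nodup :=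
      (PySem.List.sorted_perm _ _ false).nodup_iff.mpr (List.Nodup.filter _ hnd)
    have hndS' : List.Pairwise (fun a b : String => a ≠ b) (PySem.List.sorted (ks.filter (fun k => !decide (k ∈ (["auto", "semantic", "lexical"] : List String)))) (fun k => k)) := hndS
    refine List.Pairwise.imp_of_mem ?_ (List.Pairwise.and hpw hndS')
    rintro a b ha hb ⟨hle, hne⟩
    have hra : pvRankf a = 3 :=
      pvRankf_of_not_mem a (by simpa using (List.mem_filter.mp ((PySem.List.mem_sorted _ _ _ _).mp ha)).2)
    have hrb : pvRankf b = 3 :=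
      pvRankf_of_not_mem b (by simpa using (List.mem_filter.mp ((PySem.List.mem_sorted _ _ _ _).mp hb)).2)
    exact Or.inr ⟨hra.trans hrb.symm, lt_of_le_of_ne hle hne⟩
  · intro a ha b hb
    have hraa : pvRankf a ≤ 2 := by
      rcases List.mem_filter.mp ha with ⟨haP, _⟩
      fin_cases haP <;> simp [pvRankf]
    have hrb : pvRankf b = 3 := by
      have hbm := (PySem.List.mem_sorted _ _ _ _).mp hb
      exact pvRankf_of_not_mem b (by simpa using (List.mem_filter.mp hbm).2)
    exact Or.inl (by omega)

lemma central (ks : List String) (hnd : ks.Nodup) :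
    PySem.List.sorted2 ks pvRankf (fun k => k) = pvOrder ks :=
  sorted2_eq_of_perm_of_pairwise_lex ks (pvOrder ks) pvRankf (fun k => k)
    (fun _ _ h => h) hnd (pvOrder_perm ks hnd) (pvOrder_pairwise ks hnd)

lemma set_contains_filter (d : PySem.Dict String Int) (x : String) (hxk : x ∈ d.keys) :
    (PySem.Set.ofList ((["auto", "semantic", "lexical"] : List String).filter (fun k => d.contains k))).contains x
      = decide (x ∈ (["auto", "semantic", "lexical"] : List String)) := by
  by_cases hxP : x ∈ (["auto", "semantic", "lexical"] : List String)
  · have hx : x ∈ PySem.Set.ofList ((["auto", "semantic", "lexical"] : List String).filter (fun k => d.contains k)) :=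
      (PySem.Set.mem_ofList _ _).mpr
        (List.mem_filter.mpr ⟨hxP, (PySem.Dict.contains_iff_mem_keys d x).mpr hxk⟩)
    simp [PySem.Set.contains, hx, hxP]
  · have hx : x ∉ PySem.Set.ofList ((["auto", "semantic", "lexical"] : List String).filter (fun k => d.contains k)) := by
      rw [PySem.Set.mem_ofList]
      exact fun hc => hxP (List.mem_filter.mp hc).1
    simp [PySem.Set.contains, hx, hxP]

-- the core equality, for a nonempty dict
lemma main_eq (d : PySem.Dict String Int) (hnd : d.keys.Nodup) :
    (let st := (["auto", "semantic", "lexical"] : List String).foldl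
        (fun (st : List String × PySem.Set String) key =>
          if d.contains key then
            (st.1 ++ [key ++ "=" ++ PySem.Int.toStr (d.getD key 0)], st.2.add key)
          else st)
        ([], PySem.Set.empty)
     let parts := (PySem.List.sorted d.keys (fun k => k)).foldl
        (fun ps key =>
          if st.2.contains key then ps
          else ps ++ [key ++ "=" ++ PySem.Int.toStr (d.getD key 0)])
        st.1
     PySem.Str.join " " parts)
    = PySem.Str.join " "
        ((PySem.List.sorted2 d.keys (fun k => (PySem.Dict.ofList [("auto", (0:Int)), ("semantic", 1), ("lexical", 2)]).getD k 3) (fun k => k)).map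
          (fun k => k ++ "=" ++ PySem.Int.toStr (d.getD k 0))) := by
  have hrank : (fun k => (PySem.Dict.ofList [("auto", (0:Int)), ("semantic", 1), ("lexical", 2)]).getD k 3) = pvRankf :=
    funext rank_getD
  rw [hrank, central d.keys hnd]
  simp only [loopA d ["auto", "semantic", "lexical"] [] PySem.Set.empty]
  have hempty : (PySem.Set.empty : PySem.Set String) = [] := rfl
  rw [hempty, PySem.Set.update_nil_left]
  have hbody :
      (fun (ps : List String) key =>
        if (PySem.Set.ofList ((["auto", "semantic", "lexical"] : List String).filter (fun k => d.contains k))).contains key then ps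
        else ps ++ [key ++ "=" ++ PySem.Int.toStr (d.getD key 0)])
      = (fun (ps : List String) key =>
        if (!(PySem.Set.ofList ((["auto", "semantic", "lexical"] : List String).filter (fun k => d.contains k))).contains key) = true
        then ps ++ [key ++ "=" ++ PySem.Int.toStr (d.getD key 0)] else ps) := by
    funext ps key
    by_cases h : (PySem.Set.ofList ((["auto", "semantic", "lexical"] : List String).filter (fun k => d.contains k))).contains key = true
    · rw [if_pos h, if_neg (by simp only [h, Bool.not_true]; exact Bool.false_ne_true)]
    · rw [if_neg h, if_pos (by rw [Bool.not_eq_true] at h; simp only [h, Bool.not_false])]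
  rw [hbody, PySem.List.foldl_append_if]
  have hfilt :
      (PySem.List.sorted d.keys (fun k => k)).filter
        (fun key => !(PySem.Set.ofList ((["auto", "semantic", "lexical"] : List String).filter (fun k => d.contains k))).contains key)
      = (PySem.List.sorted d.keys (fun k => k)).filter
        (fun k => !decide (k ∈ (["auto", "semantic", "lexical"] : List String))) := by
    refine List.filter_congr ?_
    intro x hx
    rw [set_contains_filter d x ((PySem.List.mem_sorted _ _ _ _).mp hx)]
  rw [hfilt, filter_sorted_id d.keys hnd]
  have hF : (["auto", "semantic", "lexical"] : List String).filter (fun k => d.contains k)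
      = (["auto", "semantic", "lexical"] : List String).filter (fun k => decide (k ∈ d.keys)) := by
    refine List.filter_congr ?_
    intro x _
    exact PySem.Dict.contains_eq_decide_mem_keys d x
  rw [hF]
  simp only [List.nil_append, ← List.map_append]
  rfl

-- ===== VERDICT (by name: the statement is the Claim_ definition above) =====
theorem format_mode_counts_spec : Claim_equal_format_mode_counts := by
  intro counts _
  unfold Spec_format_mode_counts format_mode_counts format_mode_counts_alt
  cases counts with
  | none => rfl
  | some l =>
    by_cases hl : l = []
    · simp [hl]
    · simp only [hl, if_false]
      exact main_eq (PySem.Dict.ofList l) (PySem.Dict.nodup_keys_ofList l)
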